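-- pv_equiv track=rewrite | github.com/henry-25/advent_of_code_2015 | 11/bad_password_policy.txt.py | check_pass_rules
-- ===== SOURCE A (Python) =====
-- def check_pass_rules(org_string):
--     inc, cant_overlap = False, False
--     last_ch, two_back_ch = '', ''
--     num_doubles, curr_ch = 0, 0
--     while curr_ch < len(org_string):
--         if curr_ch > 1:
--             if org_string[curr_ch] == last_ch and cant_overlap is False:
--                 num_doubles += 1
--                 cant_overlap = True
--                 two_back_ch = last_ch
--                 last_ch = org_string[curr_ch]
--                 curr_ch += 1
--             elif ord(two_back_ch) + 2 == ord(last_ch) + 1 == ord(org_string[curr_ch]):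
--                 inc = True
--                 cant_overlap = False
--                 two_back_ch = last_ch
--                 last_ch = org_string[curr_ch]
--                 curr_ch += 1
--             else:
--                 cant_overlap = False
--                 two_back_ch = last_ch
--                 last_ch = org_string[curr_ch]
--                 curr_ch += 1
--         elif curr_ch == 1:
--             if org_string[curr_ch] == last_ch:
--                 num_doubles += 1
--                 cant_overlap = True
--                 two_back_ch = last_ch
--                 last_ch = org_string[curr_ch]
--                 curr_ch += 1
--             else:
--                 two_back_ch = last_ch
--                 last_ch = org_string[curr_ch]
--                 curr_ch += 1
--         else:
--             last_ch = org_string[curr_ch]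
--             curr_ch += 1
--     return inc, num_doubles
-- ===== SOURCE B (Python) =====
-- def check_pass_rules(org_string):
--     s = org_string
--     inc = any(ord(a) + 2 == ord(b) + 1 == ord(c)
--               for a, b, c in zip(s, s[1:], s[2:]))
--     num_doubles = 0
--     i = 1
--     while i < len(s):
--         if s[i] == s[i - 1]:
--             num_doubles += 1
--             i += 2
--         else:
--             i += 1
--     return inc, num_doubles
-- ===== Notes on version B (the rewrite author's own statement) =====
-- stated objective: simpler
-- what changed: A's single stateful while-loop over five mutable variables (last/two-back chars, a cant_overlap flag) is split into two independent computations: an any() over zipped char triples for the increasing run, and a skip-by-2 index loop for non-overlapping doubles.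
import Mathlib
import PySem

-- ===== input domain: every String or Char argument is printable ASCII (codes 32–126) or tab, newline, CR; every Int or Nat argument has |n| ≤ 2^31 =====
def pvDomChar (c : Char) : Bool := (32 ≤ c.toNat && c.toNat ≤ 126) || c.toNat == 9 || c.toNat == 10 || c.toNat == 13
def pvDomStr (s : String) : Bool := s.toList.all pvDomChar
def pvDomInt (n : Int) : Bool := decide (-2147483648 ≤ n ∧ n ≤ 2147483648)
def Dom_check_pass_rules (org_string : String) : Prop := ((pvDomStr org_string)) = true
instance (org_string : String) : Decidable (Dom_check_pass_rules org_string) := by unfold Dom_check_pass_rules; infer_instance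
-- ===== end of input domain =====

-- B replaces A's single stateful while-loop by two independent computations
-- (an any() over char triples and a skip-by-2 doubles count); objective: simpler.

-- ===== PORT A =====
-- ord(last_ch) / ord(two_back_ch) in A; the `none` case (Python '' → TypeError)
-- is never reached, since A only evaluates ord after both have been assigned.
def pvOrdA (o : Option Char) : Int :=
  match o with
  | some c => (c.toNat : Int)
  | none => 0

-- the while-loop of A: `rest` is org_string[curr_ch:], state carried as in A
def check_pass_rules_go (rest : List Char) (i : Nat) (inc cant : Bool)
    (last two : Option Char) (nd : Int) : Bool × Int :=
  match rest with
  | [] => (inc, nd)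
  | c :: r =>
    if i > 1 then
      if some c == last && cant == false then
        check_pass_rules_go r (i + 1) inc true (some c) last (nd + 1)
      else if pvOrdA two + 2 == pvOrdA last + 1 && pvOrdA last + 1 == (c.toNat : Int) then
        check_pass_rules_go r (i + 1) true false (some c) last nd
      else
        check_pass_rules_go r (i + 1) inc false (some c) last nd
    else if i = 1 then
      if some c == last then
        check_pass_rules_go r (i + 1) inc true (some c) last (nd + 1)
      else
        check_pass_rules_go r (i + 1) inc false (some c) last nd
    else
      check_pass_rules_go r (i + 1) inc cant (some c) two nd

def check_pass_rules (org_string : String) : Bool × Int :=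
  check_pass_rules_go org_string.toList 0 false false none none 0

-- ===== PORT B =====
-- B's while loop: i starts at 1, counts a double at s[i]==s[i-1] and skips by 2
def pvAltCount (cs : List Char) (i : Nat) : Int :=
  if h : i < cs.length then
    if cs[i] = cs[i - 1]! then 1 + pvAltCount cs (i + 2)
    else pvAltCount cs (i + 1)
  else 0
termination_by cs.length - i

def check_pass_rules_alt (org_string : String) : Bool × Int :=
  let cs := org_string.toList
  let inc := ((cs.zip (cs.drop 1)).zip (cs.drop 2)).any
      (fun p => ((p.1.1.toNat : Int) + 2 == (p.1.2.toNat : Int) + 1)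
             && ((p.1.2.toNat : Int) + 1 == (p.2.toNat : Int)))
  (inc, pvAltCount cs 1)

-- ===== PRECONDITION & SPEC =====
def Spec_check_pass_rules (org_string : String) (out : Bool × Int) : Prop := out = check_pass_rules_alt org_string
instance (org_string : String) (out : Bool × Int) : Decidable (Spec_check_pass_rules org_string out) := by unfold Spec_check_pass_rules; infer_instance

-- ===== CLAIM (what is proved, stated in full; the proofs are below) =====
def Claim_equal_check_pass_rules : Prop := ∀ (org_string : String), Dom_check_pass_rules org_string → Spec_check_pass_rules org_string (check_pass_rules org_string)

-- ===== LEMMAS AND PROOFS =====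

-- `inc` from position of `c` on, given previous char `l` and the one before it `t`
def pvIncAny (t l : Char) : List Char → Bool
  | [] => false
  | c :: r => ((((t.toNat : Int) + 2 == (l.toNat : Int) + 1)
      && ((l.toNat : Int) + 1 == (c.toNat : Int))) : Bool) || pvIncAny l c r

-- doubles counted from position of the head on, given previous char `l` and the flag
def pvCnt (l : Char) (cant : Bool) : List Char → Int
  | [] => 0
  | c :: r => if c = l ∧ cant = false then 1 + pvCnt c true r else pvCnt c false r

-- flag-free form of the doubles count
def pvCnt2 : List Char → Int
  | [] => 0
  | [_] => 0
  | l :: c :: r => if c = l then 1 + pvCnt2 r else pvCnt2 (c :: r)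

theorem go_eq (rest : List Char) : ∀ (i : Nat) (inc cant : Bool) (l t : Char) (nd : Int),
    2 ≤ i →
    check_pass_rules_go rest i inc cant (some l) (some t) nd
      = (inc || pvIncAny t l rest, nd + pvCnt l cant rest) := by
  induction rest with
  | nil => intros; simp [check_pass_rules_go, pvIncAny, pvCnt]
  | cons c r ih =>
    intro i inc cant l t nd hi
    have hgt : i > 1 := hi
    by_cases hdl : c = l
    · subst hdl
      have hne : (((c.toNat : Int) + 1 == (c.toNat : Int)) : Bool) = false := by
        rw [beq_eq_false_iff_ne]; omega
      cases cant with
      | false =>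
        simp only [check_pass_rules_go, if_pos hgt, pvOrdA]
        rw [if_pos (by simp)]
        rw [ih _ _ _ _ _ _ (by omega)]
        simp [pvIncAny, pvCnt, hne]
        ring
      | true =>
        simp only [check_pass_rules_go, if_pos hgt, pvOrdA]
        rw [if_neg (by simp), if_neg (by simp [hne])]
        rw [ih _ _ _ _ _ _ (by omega)]
        simp [pvIncAny, pvCnt, hne]
    · have hD : ((some c == some l && cant == false) : Bool) = false := by
        simp [hdl]
      simp only [check_pass_rules_go, if_pos hgt, pvOrdA, hD, Bool.false_eq_true,
        if_false]
      by_cases hT : ((((t.toNat : Int) + 2 == (l.toNat : Int) + 1)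
          && ((l.toNat : Int) + 1 == (c.toNat : Int))) : Bool) = true
      · rw [if_pos hT, ih _ _ _ _ _ _ (by omega)]
        simp [pvIncAny, pvCnt, hT, hdl]
      · have hT' := Bool.not_eq_true _ ▸ hT
        rw [if_neg hT, ih _ _ _ _ _ _ (by omega)]
        simp only [Bool.not_eq_true] at hT
        simp [pvIncAny, pvCnt, hT, hdl]

theorem zipAny_eq (r : List Char) : ∀ (t l : Char),
    (((t :: l :: r).zip (l :: r)).zip r).any
      (fun p => ((p.1.1.toNat : Int) + 2 == (p.1.2.toNat : Int) + 1)
             && ((p.1.2.toNat : Int) + 1 == (p.2.toNat : Int))) = pvIncAny t l r := by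
  induction r with
  | nil => intro t l; simp [pvIncAny]
  | cons c r' ih =>
    intro t l
    have h := ih l c
    simp only [List.zip_cons_cons, List.any_cons] at h ⊢
    rw [h, pvIncAny]

theorem cnt_eq (r : List Char) : ∀ (l : Char),
    pvCnt l false r = pvCnt2 (l :: r) ∧ pvCnt l true r = pvCnt2 r := by
  induction r with
  | nil => intro l; simp [pvCnt, pvCnt2]
  | cons c r' ih =>
    intro l
    constructor
    · by_cases h : c = l
      · simp [pvCnt, pvCnt2, h, (ih l).2]
      · simp [pvCnt, pvCnt2, h, (ih c).1]
    · simp [pvCnt, (ih c).1]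

theorem cnt2_short (xs : List Char) (h : xs.length ≤ 1) : pvCnt2 xs = 0 := by
  match xs with
  | [] => rfl
  | [_] => rfl
  | _ :: _ :: _ => simp at h

theorem altCount_eq (cs : List Char) : ∀ (n i : Nat), cs.length - i = n → 1 ≤ i →
    pvAltCount cs i = pvCnt2 (cs.drop (i - 1)) := by
  intro n
  induction n using Nat.strong_induction_on with
  | _ n ihn =>
    intro i hn h1
    by_cases hlt : i < cs.length
    · have hi1 : i - 1 < cs.length := by omega
      have hdrop1 : cs.drop (i - 1) = cs[i - 1] :: cs.drop i := by
        have h := List.drop_eq_getElem_cons hi1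
        rwa [show i - 1 + 1 = i by omega] at h
      have hdrop2 : cs.drop i = cs[i] :: cs.drop (i + 1) :=
        List.drop_eq_getElem_cons hlt
      rw [pvAltCount, dif_pos hlt, hdrop1, hdrop2, pvCnt2]
      have hbang : cs[i - 1]! = cs[i - 1] := getElem!_pos cs (i - 1) hi1
      by_cases he : cs[i] = cs[i - 1]
      · rw [if_pos (by rw [hbang]; exact he), if_pos he]
        have h := ihn (cs.length - (i + 2)) (by omega) (i + 2) rfl (by omega)
        rw [h, show i + 2 - 1 = i + 1 from rfl]
      · rw [if_neg (by rw [hbang]; exact he), if_neg he]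
        have h := ihn (cs.length - (i + 1)) (by omega) (i + 1) rfl (by omega)
        rw [h, show i + 1 - 1 = i from rfl, hdrop2]
    · rw [pvAltCount, dif_neg hlt]
      rw [cnt2_short _ (by simp; omega)]

-- ===== VERDICT (by name: the statement is the Claim_ definition above) =====
theorem check_pass_rules_spec : Claim_equal_check_pass_rules := by
  intro s _
  unfold Spec_check_pass_rules check_pass_rules check_pass_rules_alt
  match hcs : s.toList with
  | [] => simp [check_pass_rules_go, pvAltCount]
  | [c] =>
    simp [check_pass_rules_go, pvAltCount]
  | c :: d :: r =>
    have h2 : pvAltCount (c :: d :: r) 1 = pvCnt2 (c :: d :: r) := by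
      have := altCount_eq (c :: d :: r) ((c :: d :: r).length - 1) 1 rfl (by omega)
      simpa using this
    have step1 : check_pass_rules_go (c :: d :: r) 0 false false none none 0
        = check_pass_rules_go (d :: r) 1 false false (some c) none 0 := by
      conv_lhs => rw [check_pass_rules_go]
      norm_num
    have step2 : check_pass_rules_go (d :: r) 1 false false (some c) none 0
        = if some d == some c then
            check_pass_rules_go r 2 false true (some d) (some c) 1
          else check_pass_rules_go r 2 false false (some d) (some c) 0 := by
      conv_lhs => rw [check_pass_rules_go]
      norm_num
    simp only [List.drop_succ_cons, List.drop_zero]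
    rw [zipAny_eq, h2, step1, step2]
    by_cases hdc : d = c
    · rw [if_pos (by simp [hdc])]
      rw [go_eq r 2 false true d c 1 (by omega)]
      rw [pvCnt2, if_pos hdc, (cnt_eq r d).2]
      simp
    · rw [if_neg (by simp [hdc])]
      rw [go_eq r 2 false false d c 0 (by omega)]
      rw [pvCnt2, if_neg hdc, (cnt_eq r d).1]
      simp
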